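-- pv_equiv track=rewrite | github.com/guillp/adventofcode | aoc2020/06.py | solve
-- ===== SOURCE A (Python) =====
-- def solve(content: str) -> tuple[int, int]:
--     all_answers = set("abcdefghijklmnopqrstuvwxyz")
--     part1 = part2 = 0
--     for group in content.strip().split("\n\n"):
--         answers = set(group.replace("\n", ""))
--         part1 += len(answers)
--         group_answers = all_answers.copy()
--         for person in group.splitlines():
--             group_answers &= set(person)
--         part2 += len(group_answers)
--     return part1, part2
-- ===== SOURCE B (Python) =====
-- from collections import Counter
--
--
-- def solve(content: str) -> tuple[int, int]:
--     part1 = part2 = 0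
--     for group in content.strip().split("\n\n"):
--         persons = group.splitlines()
--         counter = Counter()
--         for person in persons:
--             counter.update(set(person))
--         part1 += len({ch for ch in group if ch != "\n"})
--         n = len(persons)
--         part2 += sum(1 for ch in "abcdefghijklmnopqrstuvwxyz" if counter[ch] == n)
--     return part1, part2
-- ===== Notes on version B (the rewrite author's own statement) =====
-- stated objective: alternative
-- what changed: Per group, B builds one Counter of how many persons answered each question and derives part2 by scanning the fixed a-z alphabet for counts equal to the number of persons, instead of A's repeated set-intersection starting from the full alphabet set; part1 is a set comprehension over the group's non-newline characters instead of replace+set.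
import Mathlib
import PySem

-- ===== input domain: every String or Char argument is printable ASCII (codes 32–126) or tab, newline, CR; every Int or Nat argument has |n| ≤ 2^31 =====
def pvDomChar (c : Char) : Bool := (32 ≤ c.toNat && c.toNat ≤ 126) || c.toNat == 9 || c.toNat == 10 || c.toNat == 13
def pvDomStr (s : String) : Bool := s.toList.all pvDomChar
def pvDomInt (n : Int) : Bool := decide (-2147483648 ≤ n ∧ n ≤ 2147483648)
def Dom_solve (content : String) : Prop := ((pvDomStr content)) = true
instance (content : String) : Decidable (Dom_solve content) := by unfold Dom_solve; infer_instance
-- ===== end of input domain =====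

-- B replaces A's per-group iterated set intersection by a Counter over persons scanned against the fixed a-z alphabet (objective: alternative decomposition).

-- ===== PORT A =====
def solve (content : String) : Int × Int :=
  let allAnswers : PySem.Set Char := PySem.Set.ofList "abcdefghijklmnopqrstuvwxyz".toList
  (PySem.Chars.splitOn (PySem.Chars.strip content.toList) ['\n', '\n']).foldl
    (fun (p : Int × Int) group =>
      let answers : PySem.Set Char := PySem.Set.ofList (PySem.Chars.replace group ['\n'] [])
      let groupAnswers : PySem.Set Char := (PySem.Chars.splitlines group).foldl
        (fun ga person => PySem.Set.inter ga (PySem.Set.ofList person)) allAnswers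
      (p.1 + PySem.Set.len answers, p.2 + PySem.Set.len groupAnswers))
    (0, 0)

-- ===== PORT B =====
def solve_alt (content : String) : Int × Int :=
  (PySem.Chars.splitOn (PySem.Chars.strip content.toList) ['\n', '\n']).foldl
    (fun (p : Int × Int) group =>
      let persons := PySem.Chars.splitlines group
      let counter : PySem.Dict Char Int := persons.foldl
        (fun d person => (PySem.Set.ofList person).foldl (fun d c => d.modify c 0 (· + 1)) d)
        PySem.Dict.empty
      let p1 := PySem.Set.len (PySem.Set.ofList (group.filter (fun c => c != '\n')))
      let n : Int := persons.length
      let p2 := "abcdefghijklmnopqrstuvwxyz".toList.foldl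
        (fun acc ch => if counter.getD ch 0 == n then acc + 1 else acc) (0 : Int)
      (p.1 + p1, p.2 + p2))
    (0, 0)

-- ===== PRECONDITION & SPEC =====
def Spec_solve (content : String) (out : Int × Int) : Prop := out = solve_alt content
instance (content : String) (out : Int × Int) : Decidable (Spec_solve content out) := by unfold Spec_solve; infer_instance

-- ===== CLAIM (what is proved, stated in full; the proofs are below) =====
def Claim_equal_solve : Prop := ∀ (content : String), Dom_solve content → Spec_solve content (solve content)

-- ===== LEMMAS AND PROOFS =====

-- replace(group, "\n", "") is exactly the removal of every newline character
lemma replace_go_newline (fuel : Nat) : ∀ (l acc : List Char), l.length ≤ fuel →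
    PySem.Chars.replace.go ['\n'] [] fuel l acc
      = acc.reverse ++ l.filter (fun c => c != '\n') := by
  induction fuel with
  | zero =>
    intro l acc h
    have : l = [] := List.eq_nil_of_length_eq_zero (Nat.le_zero.mp h)
    subst this
    simp [PySem.Chars.replace.go]
  | succ fuel ih =>
    intro l acc h
    cases l with
    | nil => simp [PySem.Chars.replace.go]
    | cons c t =>
      by_cases hc : c = '\n'
      · subst hc
        have : PySem.Chars.replace.go ['\n'] [] (fuel + 1) ('\n' :: t) acc
            = PySem.Chars.replace.go ['\n'] [] fuel t acc := by
          simp [PySem.Chars.replace.go, List.isPrefixOf]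
        rw [this, ih t acc (by simpa using h)]
        simp
      · have : PySem.Chars.replace.go ['\n'] [] (fuel + 1) (c :: t) acc
            = PySem.Chars.replace.go ['\n'] [] fuel t (c :: acc) := by
          simp [PySem.Chars.replace.go, List.isPrefixOf, Ne.symm hc]
        rw [this, ih t (c :: acc) (by simpa using h)]
        simp [hc]

lemma replace_newline (g : List Char) :
    PySem.Chars.replace g ['\n'] [] = g.filter (fun c => c != '\n') := by
  have h := replace_go_newline g.length g [] (le_refl _)
  simpa [PySem.Chars.replace] using h

-- the iterated intersection is a filter of the initial set
lemma foldl_inter_eq_filter (persons : List (List Char)) : ∀ (init : PySem.Set Char),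
    persons.foldl (fun ga person => PySem.Set.inter ga (PySem.Set.ofList person)) init
      = init.filter (fun c => persons.all (fun p => (PySem.Set.ofList p).contains c)) := by
  induction persons with
  | nil => intro init; simp
  | cons p ps ih =>
    intro init
    rw [List.foldl_cons, ih]
    simp only [PySem.Set.inter, List.filter_filter]
    apply List.filter_congr
    intro c _
    simp [Bool.and_comm]

-- the counter value at ch counts the persons whose answer set contains ch
lemma counter_getD (persons : List (List Char)) : ∀ (d : PySem.Dict Char Int) (ch : Char),
    (persons.foldl
        (fun d person => (PySem.Set.ofList person).foldl (fun d c => d.modify c 0 (· + 1)) d)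
        d).getD ch 0
      = d.getD ch 0 + (persons.countP (fun p => (PySem.Set.ofList p).contains ch) : Int) := by
  induction persons with
  | nil => intro d ch; simp
  | cons p ps ih =>
    intro d ch
    simp only [List.foldl_cons, ih, PySem.Dict.getD_foldl_modify_add_one]
    have hcount : ((PySem.Set.ofList p).count ch : Int)
        = if (PySem.Set.ofList p).contains ch then 1 else 0 := by
      by_cases hm : ch ∈ PySem.Set.ofList p
      · rw [List.count_eq_one_of_mem (PySem.Set.nodup_ofList p) hm]
        simp [hm]
      · rw [List.count_eq_zero_of_not_mem hm]
        simp [hm]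
    rw [hcount, List.countP_cons]
    by_cases hc : (PySem.Set.ofList p).contains ch <;> simp <;> ring

-- per-group part2 agreement
lemma part2_eq (group : List Char) :
    PySem.Set.len ((PySem.Chars.splitlines group).foldl
        (fun ga person => PySem.Set.inter ga (PySem.Set.ofList person))
        (PySem.Set.ofList "abcdefghijklmnopqrstuvwxyz".toList))
      = "abcdefghijklmnopqrstuvwxyz".toList.foldl
          (fun acc ch =>
            if ((PySem.Chars.splitlines group).foldl
                  (fun d person => (PySem.Set.ofList person).foldl (fun d c => d.modify c 0 (· + 1)) d)
                  PySem.Dict.empty).getD ch 0 == ((PySem.Chars.splitlines group).length : Int)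
            then acc + 1 else acc) (0 : Int) := by
  set persons := PySem.Chars.splitlines group with hp
  rw [PySem.List.foldl_if_add_one
      (fun ch => ((persons.foldl
            (fun (d : PySem.Dict Char Int) person =>
              (PySem.Set.ofList person).foldl (fun (d : PySem.Dict Char Int) c => d.modify c 0 (· + 1)) d)
            PySem.Dict.empty).getD ch 0 == (persons.length : Int)))]
  rw [foldl_inter_eq_filter]
  have hof : PySem.Set.ofList "abcdefghijklmnopqrstuvwxyz".toList
      = "abcdefghijklmnopqrstuvwxyz".toList := by decide
  rw [hof]
  simp only [PySem.Set.len, ← List.countP_eq_length_filter, zero_add]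
  congr 1
  apply List.countP_congr
  intro ch _
  rw [counter_getD]
  simp [PySem.Dict.getD_empty, beq_iff_eq, List.countP_eq_length,
    List.all_eq_true]

-- per-group part1 agreement
lemma part1_eq (group : List Char) :
    PySem.Set.len (PySem.Set.ofList (PySem.Chars.replace group ['\n'] []))
      = PySem.Set.len (PySem.Set.ofList (group.filter (fun c => c != '\n'))) := by
  rw [replace_newline]

-- ===== VERDICT (by name: the statement is the Claim_ definition above) =====
theorem solve_spec : Claim_equal_solve := by
  intro content _
  unfold Spec_solve solve solve_alt
  apply PySem.List.foldl_congr_mem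
  intro acc group _
  simp only
  rw [part1_eq, part2_eq]
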